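-- pv_equiv track=rewrite | github.com/Joody20/codingTests | 프로그래머스/2/154540. 무인도 여행/무인도 여행.py | solution
-- ===== SOURCE A (Python) =====
-- from collections import deque
--
-- def bfs(maps, i, j , n, m, visited):
--     dx = [-1,0,1,0]
--     dy = [0,-1,0,1]
--
--     queue = deque()
--     queue.append([i,j])
--     visited[i][j] = True
--     area = int(maps[i][j])  # 식량!!!
--
--     while queue:
--         x,y = queue.popleft()
--
--
--         for i in range(4):
--             nx = x + dx[i]
--             ny = y + dy[i]
--
--             if 0<= nx < n and 0<= ny < m:
--                 if visited[nx][ny] == 0 and maps[nx][ny] != 'X':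
--                     visited[nx][ny] = True   # 방문 처리 해주고!
--                     area += int(maps[nx][ny]) # 그 숫자를 더해줌 !!
--                     queue.append([nx,ny]) # queue에 새로운 좌표 넣어줌
--
--     return area
--
-- def solution(maps):
--     n = len(maps)    # 가로
--     m = len(maps[0]) # 세로
--     days = 0
--     result = []
--
--     visited = [[0] * m for _ in range(n)]
--
--     for i in range(n):
--         for j in range(m):
--             if visited[i][j] == 0 and maps[i][j] != 'X':
--                 days = bfs(maps,i,j,n,m,visited)
--                 result.append(days)
--
--     if len(result) > 0:
--         return sorted(result)
--     else:
--         return [-1]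
-- ===== SOURCE B (Python) =====
-- def solution(maps):
--     n = len(maps)
--     m = len(maps[0])
--     seen = set()
--     sums = []
--     for i in range(n):
--         for j in range(m):
--             if maps[i][j] != 'X' and (i, j) not in seen:
--                 # saturate: least fixed point of the neighbourhood-closure operator
--                 comp = {(i, j)}
--                 while True:
--                     grown = {(x + dx, y + dy)
--                              for (x, y) in comp
--                              for dx, dy in ((-1, 0), (1, 0), (0, -1), (0, 1))
--                              if 0 <= x + dx < n and 0 <= y + dy < m
--                              and maps[x + dx][y + dy] != 'X'
--                              and (x + dx, y + dy) not in comp}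
--                     if not grown:
--                         break
--                     comp |= grown
--                 seen |= comp
--                 sums.append(sum(int(maps[x][y]) for (x, y) in comp))
--     return sorted(sums) if sums else [-1]
-- ===== Notes on version B (the rewrite author's own statement) =====
-- stated objective: alternative
-- what changed: Replaces A's worklist flood fill (collections.deque BFS with a preallocated visited matrix, adding food as cells are enqueued) by a least-fixed-point saturation: each island is grown by repeated whole-component closure passes over set comprehensions (no queue, no frontier, no visited matrix) and its food is summed over the finished component set in one go.
import Mathlib
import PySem

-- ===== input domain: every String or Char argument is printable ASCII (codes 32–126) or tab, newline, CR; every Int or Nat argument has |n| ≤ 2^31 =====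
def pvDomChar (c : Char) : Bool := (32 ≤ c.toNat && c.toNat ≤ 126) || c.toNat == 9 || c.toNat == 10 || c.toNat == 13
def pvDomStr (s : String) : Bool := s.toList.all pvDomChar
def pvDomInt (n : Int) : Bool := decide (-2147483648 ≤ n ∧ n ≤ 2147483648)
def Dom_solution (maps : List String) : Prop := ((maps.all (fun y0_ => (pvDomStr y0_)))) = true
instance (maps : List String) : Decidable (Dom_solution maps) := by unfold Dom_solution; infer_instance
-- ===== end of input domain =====

-- B replaces A's worklist BFS (deque + boolean visited matrix) by a least-fixed-point saturation:
-- each island is grown by repeated whole-component closure passes over sets, with no queue and no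
-- visited matrix, and its food is summed over the finished component; only the sorted sums agree.

-- ===== PORT A =====
-- shared cell primitives (Python's maps[x][y] and int(maps[x][y]); both accesses happen
-- only under 0<=x<n, 0<=y<m guards / Pre_, where pyGetD is exact and the defaults are never read)
def pvCell (g : List (List Char)) (x y : Int) : Char :=
  PySem.List.pyGetD (PySem.List.pyGetD g x []) y 'X'

def pvVal (c : Char) : Int := (PySem.Int.ofChars? [c]).getD 0   -- int(single char); Pre_ makes it a digit

-- visited[x][y] reads/writes; indices are guarded nonnegative in-range where used
def vGet (v : List (List Bool)) (x y : Int) : Bool :=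
  PySem.List.pyGetD (PySem.List.pyGetD v x []) y true

def vSet (v : List (List Bool)) (x y : Int) : List (List Bool) :=
  v.set x.toNat ((v.getD x.toNat []).set y.toNat true)

-- number of unvisited entries (termination measure only)
def unseenA (v : List (List Bool)) : Nat := (v.map (fun r => r.count false)).sum

def pvDxy : List (Int × Int) := [(-1, 0), (0, -1), (1, 0), (0, 1)]   -- dx/dy pairs, loop order i = 0..3

-- one neighbour step of A's inner `for i in range(4)` body; state = (visited, queue, area)
def bfsNbr (g : List (List Char)) (n m x y : Int)
    (st : List (List Bool) × List (Int × Int) × Int) (d : Int × Int) :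
    List (List Bool) × List (Int × Int) × Int :=
  let nx := x + d.1
  let ny := y + d.2
  if 0 ≤ nx ∧ nx < n ∧ 0 ≤ ny ∧ ny < m then
    if vGet st.1 nx ny = false ∧ pvCell g nx ny ≠ 'X' then
      (vSet st.1 nx ny, st.2.1 ++ [(nx, ny)], st.2.2 + pvVal (pvCell g nx ny))
    else st
  else st

theorem count_set_true_lt (r : List Bool) : ∀ (l : Nat), r[l]? = some false →
    (r.set l true).count false < r.count false := by
  induction r with
  | nil => intro l h; simp at h
  | cons b t ih =>
    intro l h
    cases l with
    | zero => simp_all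
    | succ l =>
      simp only [List.getElem?_cons_succ] at h
      have := ih l h
      simpa [List.count_cons] using this

theorem unseenA_set_lt (v : List (List Bool)) : ∀ (k : Nat) (row : List Bool) (l : Nat),
    v[k]? = some row → row[l]? = some false →
    unseenA (v.set k (row.set l true)) < unseenA v := by
  induction v with
  | nil => intro k row l h; simp at h
  | cons r rs ih =>
    intro k row l h1 h2
    cases k with
    | zero =>
      simp only [List.getElem?_cons_zero, Option.some.injEq] at h1
      subst h1
      simpa [unseenA] using count_set_true_lt r l h2
    | succ k =>
      simp only [List.getElem?_cons_succ] at h1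
      have := ih k row l h1 h2
      simpa [unseenA] using this

theorem unseenA_vset_lt (v : List (List Bool)) (x y : Int) (hx : 0 ≤ x) (hy : 0 ≤ y)
    (h : vGet v x y = false) : unseenA (vSet v x y) < unseenA v := by
  unfold vGet at h
  rw [show PySem.List.pyGetD v x [] = (v[x.toNat]?).getD [] by
        simp [PySem.List.pyGetD, PySem.List.pyGet?_of_nonneg (xs := v) hx]] at h
  rw [show ∀ r : List Bool, PySem.List.pyGetD r y true = (r[y.toNat]?).getD true from fun r => by
        simp [PySem.List.pyGetD, PySem.List.pyGet?_of_nonneg (xs := r) hy]] at h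
  cases h1 : v[x.toNat]? with
  | none => rw [h1] at h; simp at h
  | some row =>
    rw [h1] at h; simp only [Option.getD_some] at h
    cases h2 : row[y.toNat]? with
    | none => rw [h2] at h; simp at h
    | some b =>
      rw [h2] at h; simp only [Option.getD_some] at h; subst h
      have hrow : v.getD x.toNat [] = row := by simp [List.getD, h1]
      unfold vSet
      rw [hrow]
      exact unseenA_set_lt v x.toNat row y.toNat h1 h2

theorem foldl_measure_le {σ : Type} (f : σ → (Int × Int) → σ) (meas : σ → Nat)
    (hstep : ∀ s d, meas (f s d) ≤ meas s) :
    ∀ (l : List (Int × Int)) (s : σ), meas (l.foldl f s) ≤ meas s := by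
  intro l
  induction l with
  | nil => intro s; simp
  | cons d t ih => intro s; exact le_trans (ih (f s d)) (hstep s d)

theorem bfsNbr_measure (g : List (List Char)) (n m x y : Int)
    (st : List (List Bool) × List (Int × Int) × Int) (d : Int × Int) :
    6 * unseenA (bfsNbr g n m x y st d).1 + (bfsNbr g n m x y st d).2.1.length ≤
    6 * unseenA st.1 + st.2.1.length := by
  unfold bfsNbr
  simp only []
  split
  · split
    · rename_i hb hm
      have := unseenA_vset_lt st.1 (x + d.1) (y + d.2) hb.1 hb.2.2.1 hm.1
      simp only []
      simp [List.length_append]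
      omega
    · exact le_refl _
  · exact le_refl _

theorem bfsFold_measure (g : List (List Char)) (n m x y : Int)
    (st : List (List Bool) × List (Int × Int) × Int) :
    6 * unseenA (pvDxy.foldl (bfsNbr g n m x y) st).1 +
      (pvDxy.foldl (bfsNbr g n m x y) st).2.1.length ≤
    6 * unseenA st.1 + st.2.1.length :=
  foldl_measure_le (bfsNbr g n m x y) (fun s => 6 * unseenA s.1 + s.2.1.length)
    (bfsNbr_measure g n m x y) pvDxy st

-- A's `while queue:` loop; returns (area, visited)
def bfsLoop (g : List (List Char)) (n m : Int) (v : List (List Bool))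
    (q : List (Int × Int)) (area : Int) : Int × List (List Bool) :=
  match q with
  | [] => (area, v)
  | (x, y) :: rest =>
    let st := pvDxy.foldl (bfsNbr g n m x y) (v, rest, area)
    bfsLoop g n m st.1 st.2.1 st.2.2
termination_by 6 * unseenA v + q.length
decreasing_by
  calc 6 * unseenA (pvDxy.foldl (bfsNbr g n m x y) (v, rest, area)).1 +
        (pvDxy.foldl (bfsNbr g n m x y) (v, rest, area)).2.1.length
      ≤ 6 * unseenA v + rest.length := bfsFold_measure g n m x y (v, rest, area)
    _ < 6 * unseenA v + ((x, y) :: rest).length := by simp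

-- Python bfs(maps, i, j, n, m, visited): mark start, area = int(start cell), run queue; returns (area, visited)
def bfs (g : List (List Char)) (i j n m : Int) (v : List (List Bool)) : Int × List (List Bool) :=
  bfsLoop g n m (vSet v i j) [(i, j)] (pvVal (pvCell g i j))

def solution (maps : List String) : List Int :=
  let g := maps.map (·.toList)
  let n : Int := maps.length
  let m : Int := ((PySem.List.pyGetD g 0 []).length : Int)   -- len(maps[0]); Pre_ excludes maps = [] where Python raises
  let init : List (List Bool) := List.replicate n.toNat (List.replicate m.toNat false)
  let st := (PySem.List.pyRange 0 n 1).foldl (fun st i =>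
      (PySem.List.pyRange 0 m 1).foldl (fun st j =>
        if vGet st.1 i j = false ∧ pvCell g i j ≠ 'X' then
          let r := bfs g i j n m st.1
          (r.2, st.2 ++ [r.1])
        else st) st) (init, ([] : List Int))
  if st.2.length > 0 then PySem.List.sorted st.2 (fun x => x) false else [-1]

-- ===== PORT B =====
-- sum of the island values over a list of cells (B's `sum(int(maps[x][y]) for (x, y) in comp)`)
def csum (g : List (List Char)) (l : List (Int × Int)) : Int :=
  (l.map (fun c => pvVal (pvCell g c.1 c.2))).sum

def pvOffs : List (Int × Int) := [(-1, 0), (1, 0), (0, -1), (0, 1)]   -- B's offset tuple order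

-- B's `grown` set comprehension, as the list it collects before dedup
def growList (g : List (List Char)) (n m : Int) (comp : PySem.Set (Int × Int)) :
    List (Int × Int) :=
  comp.flatMap (fun c =>
    (pvOffs.map (fun d => (c.1 + d.1, c.2 + d.2))).filter (fun e =>
      decide (0 ≤ e.1) && decide (e.1 < n) && decide (0 ≤ e.2) && decide (e.2 < m) &&
      decide (pvCell g e.1 e.2 ≠ 'X') && !(PySem.Set.contains comp e)))

-- the row-major cell grid and the count of cells not yet in a set (termination measure only)
def gridL (n m : Int) : List (Int × Int) :=
  (PySem.List.pyRange 0 n 1).flatMap (fun i => (PySem.List.pyRange 0 m 1).map (fun j => (i, j)))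

theorem mem_gridL (n m : Int) (c : Int × Int) :
    c ∈ gridL n m ↔ 0 ≤ c.1 ∧ c.1 < n ∧ 0 ≤ c.2 ∧ c.2 < m := by
  obtain ⟨a, b⟩ := c
  simp only [gridL, List.mem_flatMap, List.mem_map, PySem.List.mem_pyRange_one, Prod.mk.injEq]
  constructor
  · rintro ⟨i, hi, j, hj, rfl, rfl⟩; exact ⟨hi.1, hi.2, hj.1, hj.2⟩
  · rintro ⟨h1, h2, h3, h4⟩; exact ⟨a, ⟨h1, h2⟩, b, ⟨h3, h4⟩, rfl, rfl⟩

def unseenC (n m : Int) (s : PySem.Set (Int × Int)) : Nat :=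
  (gridL n m).countP (fun c => !(PySem.Set.contains s c))

theorem countP_lt_of_mem {l : List (Int × Int)} {p q : (Int × Int) → Bool}
    (hle : ∀ x, q x = true → p x = true) {a : Int × Int}
    (ha : a ∈ l) (hp : p a = true) (hq : q a = false) : l.countP q < l.countP p := by
  induction l with
  | nil => simp at ha
  | cons b t ih =>
    rcases List.mem_cons.mp ha with h | h
    · subst h
      have h1 : t.countP q ≤ t.countP p := List.countP_mono_left (fun x _ hx => hle x hx)
      simp [hp, hq]
      omega
    · have h2 := ih h
      simp only [List.countP_cons]
      have h3 : (if q b then 1 else 0 : Nat) ≤ (if p b then 1 else 0) := by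
        cases hqb : q b
        · cases hpb : p b <;> simp
        · simp [hle b hqb]
      omega

theorem mem_growList {g : List (List Char)} {n m : Int} {comp : PySem.Set (Int × Int)}
    {e : Int × Int} (he : e ∈ growList g n m comp) :
    (∃ c ∈ comp, ∃ d ∈ pvOffs, e = (c.1 + d.1, c.2 + d.2)) ∧
    0 ≤ e.1 ∧ e.1 < n ∧ 0 ≤ e.2 ∧ e.2 < m ∧ pvCell g e.1 e.2 ≠ 'X' ∧ e ∉ comp := by
  simp only [growList, List.mem_flatMap, List.mem_filter, List.mem_map] at he
  obtain ⟨c, hc, ⟨d, hd, rfl⟩, hcond⟩ := he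
  simp only [Bool.and_eq_true, decide_eq_true_eq, Bool.not_eq_true'] at hcond
  obtain ⟨⟨⟨⟨⟨h1, h2⟩, h3⟩, h4⟩, h5⟩, h6⟩ := hcond
  refine ⟨⟨c, hc, d, hd, rfl⟩, h1, h2, h3, h4, h5, ?_⟩
  intro hmem
  rw [(PySem.Set.contains_iff comp _).mpr hmem] at h6
  exact absurd h6 (by decide)

theorem unseenC_union_grow_lt (g : List (List Char)) (n m : Int)
    (comp : PySem.Set (Int × Int))
    (hne : PySem.Set.ofList (growList g n m comp) ≠ []) :
    unseenC n m (PySem.Set.union comp (PySem.Set.ofList (growList g n m comp))) <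
      unseenC n m comp := by
  obtain ⟨e, he⟩ := List.exists_mem_of_ne_nil _ hne
  have heg : e ∈ growList g n m comp := (PySem.Set.mem_ofList _ _).mp he
  obtain ⟨-, h1, h2, h3, h4, -, hnc⟩ := mem_growList heg
  apply countP_lt_of_mem (a := e)
    (hle := fun x hx => by
      simp only [Bool.not_eq_true'] at hx ⊢
      rw [← Bool.not_eq_true, PySem.Set.contains_iff] at hx ⊢
      exact fun hm => hx ((PySem.Set.mem_union _ _ _).mpr (Or.inl hm)))
    ((mem_gridL n m e).mpr ⟨h1, h2, h3, h4⟩)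
  · simp only [Bool.not_eq_true']
    rw [← Bool.not_eq_true, PySem.Set.contains_iff]
    exact hnc
  · show (!PySem.Set.contains (PySem.Set.union comp (PySem.Set.ofList (growList g n m comp))) e) = false
    rw [(PySem.Set.contains_iff _ _).mpr ((PySem.Set.mem_union _ _ _).mpr (Or.inr he))]
    rfl

-- B's `while True:` saturation loop: grow the component until no new cell appears
def satLoop (g : List (List Char)) (n m : Int) (comp : PySem.Set (Int × Int)) :
    PySem.Set (Int × Int) :=
  if PySem.Set.ofList (growList g n m comp) = [] then comp
  else satLoop g n m (PySem.Set.union comp (PySem.Set.ofList (growList g n m comp)))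
termination_by unseenC n m comp
decreasing_by exact unseenC_union_grow_lt g n m comp (by assumption)

def solution_alt (maps : List String) : List Int :=
  let g := maps.map (·.toList)
  let n : Int := maps.length
  let m : Int := ((PySem.List.pyGetD g 0 []).length : Int)
  let st := (PySem.List.pyRange 0 n 1).foldl (fun st i =>
      (PySem.List.pyRange 0 m 1).foldl (fun st j =>
        if pvCell g i j ≠ 'X' ∧ PySem.Set.contains st.1 (i, j) = false then
          let comp := satLoop g n m (PySem.Set.ofList [(i, j)])
          (PySem.Set.union st.1 comp, st.2 ++ [csum g comp])
        else st) st) ((PySem.Set.empty : PySem.Set (Int × Int)), ([] : List Int))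
  if st.2 ≠ [] then PySem.List.sorted st.2 (fun x => x) false else [-1]

-- ===== PRECONDITION & SPEC =====
-- Pre_ is exactly where Python A returns: maps nonempty (else maps[0] raises IndexError), every row at
-- least as long as the first (else the row-major scan raises IndexError), and every character in the
-- first len(maps[0]) columns a decimal digit or 'X' (else int(cell) raises ValueError).
def Pre_solution (maps : List String) : Prop :=
  maps ≠ [] ∧
  (maps.all (fun s =>
    decide ((maps.headD "").toList.length ≤ s.toList.length) &&
    (s.toList.take (maps.headD "").toList.length).all (fun c => c.isDigit || c == 'X'))) = true
instance (maps : List String) : Decidable (Pre_solution maps) := by unfold Pre_solution; infer_instance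

def pvWitness_solution : List String := (["X9", "23"])

def Spec_solution (maps : List String) (out : List Int) : Prop := out = solution_alt maps
instance (maps : List String) (out : List Int) : Decidable (Spec_solution maps out) := by unfold Spec_solution; infer_instance

-- ===== CLAIM (what is proved, stated in full; the proofs are below) =====
def Claim_equal_solution : Prop := ∀ (maps : List String), Dom_solution maps → Pre_solution maps → Spec_solution maps (solution maps)

-- ===== LEMMAS AND PROOFS =====

-- land cells, 4-adjacency and reachability (proof-layer only)
def landP (g : List (List Char)) (n m : Int) (c : Int × Int) : Prop :=
  0 ≤ c.1 ∧ c.1 < n ∧ 0 ≤ c.2 ∧ c.2 < m ∧ pvCell g c.1 c.2 ≠ 'X'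

def adjP (g : List (List Char)) (n m : Int) (c d : Int × Int) : Prop :=
  landP g n m c ∧ landP g n m d ∧
    ((d.1 = c.1 - 1 ∧ d.2 = c.2) ∨ (d.1 = c.1 + 1 ∧ d.2 = c.2) ∨
     (d.1 = c.1 ∧ d.2 = c.2 - 1) ∨ (d.1 = c.1 ∧ d.2 = c.2 + 1))

def Reach (g : List (List Char)) (n m : Int) (s c : Int × Int) : Prop :=
  Relation.ReflTransGen (adjP g n m) s c

theorem adjP_symm {g : List (List Char)} {n m : Int} {c d : Int × Int}
    (h : adjP g n m c d) : adjP g n m d c := by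
  obtain ⟨h1, h2, h3⟩ := h
  exact ⟨h2, h1, by omega⟩

theorem reach_land {g : List (List Char)} {n m : Int} {s c : Int × Int}
    (hs : landP g n m s) (h : Reach g n m s c) : landP g n m c := by
  induction h with
  | refl => exact hs
  | tail _ hadj _ => exact hadj.2.1

-- marked-cell predicates for the two ports
def mA (n m : Int) (v : List (List Bool)) (c : Int × Int) : Prop :=
  0 ≤ c.1 ∧ c.1 < n ∧ 0 ≤ c.2 ∧ c.2 < m ∧ vGet v c.1 c.2 = true

def mB (n m : Int) (seen : List (Int × Int)) (c : Int × Int) : Prop :=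
  0 ≤ c.1 ∧ c.1 < n ∧ 0 ≤ c.2 ∧ c.2 < m ∧ c ∈ seen

def mAb (n m : Int) (v : List (List Bool)) (c : Int × Int) : Bool :=
  decide (0 ≤ c.1) && decide (c.1 < n) && decide (0 ≤ c.2) && decide (c.2 < m) && vGet v c.1 c.2

theorem mAb_iff (n m : Int) (v : List (List Bool)) (c : Int × Int) :
    mAb n m v c = true ↔ mA n m v c := by
  simp [mAb, mA, and_assoc]

theorem csum_nil (g : List (List Char)) : csum g [] = 0 := rfl

theorem csum_cons (g : List (List Char)) (c : Int × Int) (l : List (Int × Int)) :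
    csum g (c :: l) = pvVal (pvCell g c.1 c.2) + csum g l := by
  simp [csum]

theorem csum_perm {g : List (List Char)} {l₁ l₂ : List (Int × Int)} (h : l₁.Perm l₂) :
    csum g l₁ = csum g l₂ :=
  List.Perm.sum_eq (h.map _)

theorem csum_filter_insert {g : List (List Char)} {l : List (Int × Int)}
    {p q : (Int × Int) → Bool} {c : Int × Int} (hnd : l.Nodup) (hc : c ∈ l)
    (hp : p c = false) (hq : q c = true) (h : ∀ x, x ≠ c → q x = p x) :
    csum g (l.filter q) = csum g (l.filter p) + pvVal (pvCell g c.1 c.2) := by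
  induction l with
  | nil => simp at hc
  | cons a t ih =>
    rcases List.mem_cons.mp hc with rfl | hct
    · have hqt : ∀ x ∈ t, q x = p x := fun x hx =>
        h x (fun hxc => ((List.nodup_cons.mp hnd).1 (hxc ▸ hx)))
      rw [List.filter_cons, List.filter_cons, hp, hq]
      simp only [Bool.false_eq_true, if_false, if_true]
      rw [csum_cons, List.filter_congr hqt]
      ring
    · have hac : a ≠ c := fun hac => ((List.nodup_cons.mp hnd).1 (hac ▸ hct))
      have hrec := ih (List.nodup_cons.mp hnd).2 hct
      rw [List.filter_cons, List.filter_cons, h a hac]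
      cases hpa : p a
      · simp only [if_false, Bool.false_eq_true]; exact hrec
      · simp only [if_true]; rw [csum_cons, csum_cons, hrec]; ring

theorem nodup_gridL (n m : Int) : (gridL n m).Nodup := by
  rw [gridL, List.nodup_flatMap]
  constructor
  · intro i _
    exact (PySem.List.nodup_pyRange_one 0 m).map
      (fun a b hab => by simpa using congrArg Prod.snd hab)
  · apply (PySem.List.pairwise_lt_pyRange_one (a := 0) (b := n)).imp
    intro a b hab x hxa hxb
    simp only [List.mem_map] at hxa hxb
    obtain ⟨ja, _, rfl⟩ := hxa
    obtain ⟨jb, _, h2⟩ := hxb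
    have := congrArg Prod.fst h2
    simp at this
    omega

-- reading/writing the visited matrix
theorem vGet_norm (v : List (List Bool)) (a b : Int) (ha : 0 ≤ a) (hb : 0 ≤ b) :
    vGet v a b = (((v[a.toNat]?).getD [])[b.toNat]?).getD true := by
  unfold vGet
  rw [show PySem.List.pyGetD v a [] = (v[a.toNat]?).getD [] by
        simp [PySem.List.pyGetD, PySem.List.pyGet?_of_nonneg (xs := v) ha]]
  simp [PySem.List.pyGetD, PySem.List.pyGet?_of_nonneg (xs := (v[a.toNat]?).getD []) hb]

def wfV (n m : Int) (v : List (List Bool)) : Prop :=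
  v.length = n.toNat ∧ ∀ r ∈ v, r.length = m.toNat

theorem wfV_vSet {n m : Int} {v : List (List Bool)} (h : wfV n m v) (x y : Int) :
    wfV n m (vSet v x y) := by
  obtain ⟨h1, h2⟩ := h
  by_cases hx : x.toNat < v.length
  · constructor
    · simp [vSet, h1]
    · intro r hr
      rcases List.mem_or_eq_of_mem_set hr with hmem | rfl
      · exact h2 r hmem
      · rw [List.length_set, List.getD_eq_getElem v [] hx]
        exact h2 _ (List.getElem_mem hx)
  · unfold vSet
    rw [List.set_eq_of_length_le (by omega)]
    exact ⟨h1, h2⟩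

theorem vGet_vSet {n m : Int} {v : List (List Bool)} (hwf : wfV n m v) {x y a b : Int}
    (hx : 0 ≤ x) (hxn : x < n) (hy : 0 ≤ y) (hym : y < m)
    (ha : 0 ≤ a) (han : a < n) (hb : 0 ≤ b) (_hbm : b < m) :
    vGet (vSet v x y) a b = if a = x ∧ b = y then true else vGet v a b := by
  obtain ⟨hlen, hrow⟩ := hwf
  have hxv : x.toNat < v.length := by omega
  have hrowx : v.getD x.toNat [] = v[x.toNat] := List.getD_eq_getElem v [] hxv
  have hyr : y.toNat < (v[x.toNat]).length := by
    rw [hrow _ (List.getElem_mem hxv)]; omega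
  rw [vGet_norm _ _ _ ha hb, vGet_norm _ _ _ ha hb]
  unfold vSet
  rw [hrowx]
  by_cases hax : a = x
  · subst hax
    rw [List.getElem?_set_self (by omega)]
    simp only [Option.getD_some]
    by_cases hby : b = y
    · subst hby
      rw [List.getElem?_set_self (by omega)]
      simp
    · have : b.toNat ≠ y.toNat := by omega
      rw [List.getElem?_set_ne (Ne.symm this)]
      rw [if_neg (by tauto)]
      rw [List.getElem?_eq_getElem hxv]
      simp
  · have hne : x.toNat ≠ a.toNat := by omega
    unfold vSet at *
    rw [List.getElem?_set_ne hne]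
    rw [if_neg (by tauto)]

theorem mA_vSet_iff {n m : Int} {v : List (List Bool)} (hwf : wfV n m v)
    {x y : Int} (hx : 0 ≤ x) (hxn : x < n) (hy : 0 ≤ y) (hym : y < m) (c : Int × Int) :
    mA n m (vSet v x y) c ↔ mA n m v c ∨ c = (x, y) := by
  unfold mA
  by_cases hc : 0 ≤ c.1 ∧ c.1 < n ∧ 0 ≤ c.2 ∧ c.2 < m
  · obtain ⟨h1, h2, h3, h4⟩ := hc
    rw [vGet_vSet hwf hx hxn hy hym h1 h2 h3 h4]
    by_cases hcx : c.1 = x ∧ c.2 = y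
    · simp [hcx, Prod.ext_iff]
      exact ⟨hx, hxn, hy, hym⟩
    · rw [if_neg hcx]
      simp [Prod.ext_iff, h1, h2, h3, h4]
      tauto
  · constructor
    · intro h; exact absurd ⟨h.1, h.2.1, h.2.2.1, h.2.2.2.1⟩ hc
    · rintro (h | rfl)
      · exact absurd ⟨h.1, h.2.1, h.2.2.1, h.2.2.2.1⟩ hc
      · exact absurd ⟨hx, hxn, hy, hym⟩ hc

theorem mA_init (n m : Int) (c : Int × Int) :
    ¬ mA n m (List.replicate n.toNat (List.replicate m.toNat false)) c := by
  intro ⟨h1, h2, h3, h4, h5⟩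
  rw [vGet_norm _ _ _ h1 h3] at h5
  rw [List.getElem?_replicate_of_lt (by omega)] at h5
  simp at h5
  rw [List.getElem?_replicate_of_lt (by omega)] at h5
  simp at h5

theorem wfV_init (n m : Int) : wfV n m (List.replicate n.toNat (List.replicate m.toNat false)) := by
  constructor
  · simp
  · intro r hr
    rw [List.eq_of_mem_replicate hr]
    simp

-- reachability facts
-- a set that contains start, is contained in the reach set, and is adjacency-closed
-- modulo an adjacency-backward-closed Old set, is exactly the reach set
theorem closure_char {g : List (List Char)} {n m : Int} (New Old : (Int × Int) → Prop)
    (start : Int × Int)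
    (hstart : New start)
    (hreach : ∀ c, New c → Reach g n m start c)
    (hclosed : ∀ c d, New c → adjP g n m c d → New d ∨ Old d)
    (holdcl : ∀ c d, adjP g n m c d → Old d → Old c)
    (hdisj : ∀ c, New c → ¬ Old c) :
    ∀ c, New c ↔ Reach g n m start c := by
  intro c
  constructor
  · exact hreach c
  · intro h
    induction h with
    | refl => exact hstart
    | tail hr hadj ih =>
      rcases hclosed _ _ ih hadj with h | h
      · exact h
      · exact absurd (holdcl _ _ hadj h) (hdisj _ ih)

-- along a reach path, a backward-closed marked set that holds at the end holds at the start
theorem reach_marked {g : List (List Char)} {n m : Int} (P : (Int × Int) → Prop)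
    (hold : ∀ c d, adjP g n m c d → P d → P c) {s c : Int × Int}
    (h : Reach g n m s c) (hc : P c) : P s := by
  induction h with
  | refl => exact hc
  | tail _ hadj ih => exact ih (hold _ _ hadj hc)

-- the four neighbours of a cell: any adjacent cell is one of the offsets
theorem adj_offsets {g : List (List Char)} {n m : Int} {w d : Int × Int}
    (h : adjP g n m w d) :
    d = (w.1 + -1, w.2 + 0) ∨ d = (w.1 + 0, w.2 + -1) ∨ d = (w.1 + 1, w.2 + 0) ∨
    d = (w.1 + 0, w.2 + 1) := by
  obtain ⟨_, _, h3⟩ := h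
  rcases h3 with ⟨ha, hb⟩ | ⟨ha, hb⟩ | ⟨ha, hb⟩ | ⟨ha, hb⟩ <;>
    simp [Prod.ext_iff, ha, hb] <;> omega

theorem bool_eq_of_iff {a b : Bool} (h : a = true ↔ b = true) : a = b := by
  cases a <;> cases b <;> simp_all

-- the invariant of A's BFS loop, relative to the pre-island visited matrix v₀
structure InvA (g : List (List Char)) (n m : Int) (v₀ : List (List Bool)) (start : Int × Int)
    (v : List (List Bool)) (q : List (Int × Int)) (area : Int) : Prop where
  wf : wfV n m v
  mono : ∀ c, mA n m v₀ c → mA n m v c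
  nodupq : q.Nodup
  qnew : ∀ c ∈ q, (mA n m v c ∧ ¬ mA n m v₀ c) ∧ landP g n m c
  reach : ∀ c, mA n m v c → ¬ mA n m v₀ c → Reach g n m start c
  closed : ∀ c, mA n m v c → ¬ mA n m v₀ c → c ∉ q → ∀ d, adjP g n m c d → mA n m v d
  startm : mA n m v start ∧ ¬ mA n m v₀ start
  area_eq : area = csum g ((gridL n m).filter (fun c => mAb n m v c && !mAb n m v₀ c))

-- invariant during the neighbour fold of one popped cell w = (x, y)
structure PStA (g : List (List Char)) (n m : Int) (v₀ : List (List Bool)) (start : Int × Int)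
    (x y : Int) (st : List (List Bool) × List (Int × Int) × Int) : Prop where
  wf : wfV n m st.1
  mono : ∀ c, mA n m v₀ c → mA n m st.1 c
  nodupq : st.2.1.Nodup
  qnew : ∀ c ∈ st.2.1, (mA n m st.1 c ∧ ¬ mA n m v₀ c) ∧ landP g n m c
  reach : ∀ c, mA n m st.1 c → ¬ mA n m v₀ c → Reach g n m start c
  closedW : ∀ c, mA n m st.1 c → ¬ mA n m v₀ c → c ∉ st.2.1 → c ≠ (x, y) →
      ∀ d, adjP g n m c d → mA n m st.1 d
  startm : mA n m st.1 start ∧ ¬ mA n m v₀ start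
  wmark : mA n m st.1 (x, y) ∧ ¬ mA n m v₀ (x, y)
  wland : landP g n m (x, y)
  wnotq : (x, y) ∉ st.2.1
  area_eq : st.2.2 = csum g ((gridL n m).filter (fun c => mAb n m st.1 c && !mAb n m v₀ c))

theorem bfsNbr_step {g : List (List Char)} {n m : Int} {v₀ : List (List Bool)}
    {start : Int × Int} {x y : Int} {st : List (List Bool) × List (Int × Int) × Int}
    (hP : PStA g n m v₀ start x y st) {d : Int × Int} (hd : d ∈ pvDxy) :
    PStA g n m v₀ start x y (bfsNbr g n m x y st d) ∧
    (∀ c, mA n m st.1 c → mA n m (bfsNbr g n m x y st d).1 c) ∧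
    (landP g n m (x + d.1, y + d.2) → mA n m (bfsNbr g n m x y st d).1 (x + d.1, y + d.2)) := by
  unfold bfsNbr
  simp only []
  by_cases hb : 0 ≤ x + d.1 ∧ x + d.1 < n ∧ 0 ≤ y + d.2 ∧ y + d.2 < m
  · rw [if_pos hb]
    by_cases hm : vGet st.1 (x + d.1) (y + d.2) = false ∧ pvCell g (x + d.1) (y + d.2) ≠ 'X'
    · rw [if_pos hm]
      obtain ⟨hb1, hb2, hb3, hb4⟩ := hb
      set nb : Int × Int := (x + d.1, y + d.2) with hnb
      have hiff := mA_vSet_iff hP.wf hb1 hb2 hb3 hb4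
      have hnotm : ¬ mA n m st.1 nb := fun hc => by
        have := hc.2.2.2.2; rw [hm.1] at this; exact Bool.false_ne_true this
      have hnot0 : ¬ mA n m v₀ nb := fun hc => hnotm (hP.mono nb hc)
      have hland : landP g n m nb := ⟨hb1, hb2, hb3, hb4, hm.2⟩
      have hadjw : adjP g n m (x, y) nb := by
        refine ⟨hP.wland, hland, ?_⟩
        fin_cases hd <;> simp [hnb] <;> omega
      have hmono : ∀ c, mA n m st.1 c → mA n m (vSet st.1 nb.1 nb.2) c :=
        fun c hc => (hiff c).mpr (Or.inl hc)
      have hnbm : mA n m (vSet st.1 nb.1 nb.2) nb := (hiff nb).mpr (Or.inr rfl)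
      refine ⟨⟨wfV_vSet hP.wf _ _, fun c hc => hmono c (hP.mono c hc), ?_, ?_, ?_, ?_, ?_, ?_, ?_, ?_, ?_⟩, hmono, fun _ => hnbm⟩
      · -- nodup (q ++ [nb])
        refine List.Nodup.append hP.nodupq (List.nodup_singleton nb) ?_
        intro c hc hc2
        rw [List.mem_singleton] at hc2
        subst hc2
        exact hnotm ((hP.qnew _ hc).1.1)
      · -- qnew
        intro c hc
        rcases List.mem_append.mp hc with hc | hc
        · obtain ⟨⟨h1, h2⟩, h3⟩ := hP.qnew c hc
          exact ⟨⟨hmono c h1, h2⟩, h3⟩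
        · rw [List.mem_singleton] at hc
          subst hc
          exact ⟨⟨hnbm, hnot0⟩, hland⟩
      · -- reach
        intro c hc hc0
        rcases (hiff c).mp hc with hc | rfl
        · exact hP.reach c hc hc0
        · exact Relation.ReflTransGen.tail (hP.reach _ hP.wmark.1 hP.wmark.2) hadjw
      · -- closedW
        intro c hc hc0 hcq hcw e hadj
        have hcnb : c ≠ nb := fun h => hcq (by rw [h]; simp)
        have hcold : mA n m st.1 c := by
          rcases (hiff c).mp hc with h | h
          · exact h
          · exact absurd h hcnb
        have hcq' : c ∉ st.2.1 := fun h => hcq (List.mem_append.mpr (Or.inl h))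
        exact hmono e (hP.closedW c hcold hc0 hcq' hcw e hadj)
      · exact ⟨hmono start hP.startm.1, hP.startm.2⟩
      · exact ⟨hmono _ hP.wmark.1, hP.wmark.2⟩
      · exact hP.wland
      · -- w not in q ++ [nb]
        intro h
        rcases List.mem_append.mp h with h | h
        · exact hP.wnotq h
        · rw [List.mem_singleton] at h
          exact hnotm (h ▸ hP.wmark.1)
      · -- area
        show st.2.2 + pvVal (pvCell g nb.1 nb.2) = _
        rw [hP.area_eq]
        rw [csum_filter_insert (nodup_gridL n m) ((mem_gridL n m nb).mpr ⟨hb1, hb2, hb3, hb4⟩)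
          (p := fun c => mAb n m st.1 c && !mAb n m v₀ c)
          (q := fun c => mAb n m (vSet st.1 nb.1 nb.2) c && !mAb n m v₀ c) ?_ ?_ ?_]
        · -- p nb = false
          have : mAb n m st.1 nb = false := by
            cases h : mAb n m st.1 nb
            · rfl
            · exact absurd ((mAb_iff n m st.1 nb).mp h) hnotm
          simp [this]
        · -- q nb = true
          have h1 : mAb n m (vSet st.1 nb.1 nb.2) nb = true := (mAb_iff _ _ _ _).mpr hnbm
          have h2 : mAb n m v₀ nb = false := by
            cases h : mAb n m v₀ nb
            · rfl
            · exact absurd ((mAb_iff n m v₀ nb).mp h) hnot0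
          simp [h1, h2]
        · -- q x = p x away from nb
          intro c hcnb
          have hmm : mA n m (vSet st.1 nb.1 nb.2) c ↔ mA n m st.1 c := by
            rw [hiff c]
            refine ⟨?_, Or.inl⟩
            rintro (h | rfl)
            · exact h
            · exact absurd hnb.symm hcnb
          have heq := bool_eq_of_iff ((mAb_iff _ _ _ c).trans (hmm.trans (mAb_iff _ _ _ c).symm))
          simp only [heq]
    · rw [if_neg hm]
      refine ⟨hP, fun c hc => hc, ?_⟩
      intro hland
      have hget : vGet st.1 (x + d.1) (y + d.2) = true := by
        rcases Decidable.not_and_iff_or_not.mp hm with h | h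
        · cases hv : vGet st.1 (x + d.1) (y + d.2)
          · exact absurd hv h
          · rfl
        · exact absurd hland.2.2.2.2 (by simpa using h)
      exact ⟨hb.1, hb.2.1, hb.2.2.1, hb.2.2.2, hget⟩
  · rw [if_neg hb]
    refine ⟨hP, fun c hc => hc, ?_⟩
    intro hland
    exact absurd ⟨hland.1, hland.2.1, hland.2.2.1, hland.2.2.2.1⟩ hb

theorem bfsNbr_fold {g : List (List Char)} {n m : Int} {v₀ : List (List Bool)}
    {start : Int × Int} {x y : Int} :
    ∀ (l : List (Int × Int)), (∀ d ∈ l, d ∈ pvDxy) →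
    ∀ st, PStA g n m v₀ start x y st →
    PStA g n m v₀ start x y (l.foldl (bfsNbr g n m x y) st) ∧
    (∀ c, mA n m st.1 c → mA n m (l.foldl (bfsNbr g n m x y) st).1 c) ∧
    (∀ d ∈ l, landP g n m (x + d.1, y + d.2) →
      mA n m (l.foldl (bfsNbr g n m x y) st).1 (x + d.1, y + d.2)) := by
  intro l
  induction l with
  | nil => intro _ st hP; exact ⟨hP, fun c hc => hc, by simp⟩
  | cons d t ih =>
    intro hsub st hP
    obtain ⟨hP', hmono', hnb'⟩ := bfsNbr_step hP (hsub d (List.mem_cons_self))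
    obtain ⟨hP'', hmono'', hnb''⟩ := ih (fun e he => hsub e (List.mem_cons_of_mem d he)) _ hP'
    refine ⟨hP'', fun c hc => hmono'' c (hmono' c hc), ?_⟩
    intro e he hland
    rcases List.mem_cons.mp he with rfl | he
    · exact hmono'' _ (hnb' hland)
    · exact hnb'' e he hland

-- one full iteration of A's while-loop (pop (x,y), process all four neighbours)
theorem bfsStep_inv {g : List (List Char)} {n m : Int} {v₀ : List (List Bool)}
    {start : Int × Int} {x y : Int} {rest : List (Int × Int)} {v : List (List Bool)} {area : Int}
    (hInv : InvA g n m v₀ start v ((x, y) :: rest) area) :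
    InvA g n m v₀ start (pvDxy.foldl (bfsNbr g n m x y) (v, rest, area)).1
      (pvDxy.foldl (bfsNbr g n m x y) (v, rest, area)).2.1
      (pvDxy.foldl (bfsNbr g n m x y) (v, rest, area)).2.2 := by
  have hw := hInv.qnew (x, y) List.mem_cons_self
  have hnd := List.nodup_cons.mp hInv.nodupq
  have hP0 : PStA g n m v₀ start x y (v, rest, area) :=
    { wf := hInv.wf
      mono := hInv.mono
      nodupq := hnd.2
      qnew := fun c hc => hInv.qnew c (List.mem_cons_of_mem _ hc)
      reach := hInv.reach
      closedW := fun c h1 h2 hcq hcw d hadj =>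
        hInv.closed c h1 h2 (fun hmem => by
          rcases List.mem_cons.mp hmem with rfl | hmem
          · exact hcw rfl
          · exact hcq hmem) d hadj
      startm := hInv.startm
      wmark := hw.1
      wland := hw.2
      wnotq := hnd.1
      area_eq := hInv.area_eq }
  obtain ⟨hP, hmono, hnb⟩ := bfsNbr_fold pvDxy (fun d hd => hd) _ hP0
  exact
    { wf := hP.wf
      mono := hP.mono
      nodupq := hP.nodupq
      qnew := hP.qnew
      reach := hP.reach
      closed := by
        intro c h1 h2 hcq d hadj
        by_cases hcw : c = (x, y)
        · subst hcw
          rcases adj_offsets hadj with h | h | h | h <;> subst h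
          · exact hnb (-1, 0) (by simp [pvDxy]) hadj.2.1
          · exact hnb (0, -1) (by simp [pvDxy]) hadj.2.1
          · exact hnb (1, 0) (by simp [pvDxy]) hadj.2.1
          · exact hnb (0, 1) (by simp [pvDxy]) hadj.2.1
        · exact hP.closedW c h1 h2 hcq hcw d hadj
      startm := hP.startm
      area_eq := hP.area_eq }

theorem bfsLoop_spec {g : List (List Char)} {n m : Int} {v₀ : List (List Bool)}
    {start : Int × Int}
    (hold : ∀ c d, adjP g n m c d → mA n m v₀ d → mA n m v₀ c) :
    ∀ (v : List (List Bool)) (q : List (Int × Int)) (area : Int),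
    InvA g n m v₀ start v q area →
    (∀ c, mA n m (bfsLoop g n m v q area).2 c ↔ mA n m v₀ c ∨ Reach g n m start c) ∧
    (bfsLoop g n m v q area).1 =
      csum g ((gridL n m).filter
        (fun c => mAb n m (bfsLoop g n m v q area).2 c && !mAb n m v₀ c)) ∧
    wfV n m (bfsLoop g n m v q area).2 := by
  intro v q area
  induction v, q, area using bfsLoop.induct g n m with
  | case1 v area =>
    intro hInv
    rw [bfsLoop]
    refine ⟨?_, hInv.area_eq, hInv.wf⟩
    have hchar := closure_char (fun c => mA n m v c ∧ ¬ mA n m v₀ c) (mA n m v₀) start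
      hInv.startm
      (fun c hc => hInv.reach c hc.1 hc.2)
      (fun c d hc hadj => by
        by_cases h0 : mA n m v₀ d
        · exact Or.inr h0
        · exact Or.inl ⟨hInv.closed c hc.1 hc.2 (List.not_mem_nil) d hadj, h0⟩)
      hold
      (fun c hc => hc.2)
    intro c
    constructor
    · intro hc
      by_cases h0 : mA n m v₀ c
      · exact Or.inl h0
      · exact Or.inr ((hchar c).mp ⟨hc, h0⟩)
    · rintro (hc | hc)
      · exact hInv.mono c hc
      · exact ((hchar c).mpr hc).1
  | case2 v area x y rest st ih =>
    intro hInv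
    rw [bfsLoop]
    exact ih (bfsStep_inv hInv)

theorem bfs_spec {g : List (List Char)} {n m : Int} {v : List (List Bool)}
    {start : Int × Int}
    (hwf : wfV n m v)
    (hold : ∀ c d, adjP g n m c d → mA n m v d → mA n m v c)
    (hland : landP g n m start) (hns : ¬ mA n m v start) :
    (∀ c, mA n m (bfs g start.1 start.2 n m v).2 c ↔ mA n m v c ∨ Reach g n m start c) ∧
    (bfs g start.1 start.2 n m v).1 =
      csum g ((gridL n m).filter
        (fun c => mAb n m (bfs g start.1 start.2 n m v).2 c && !mAb n m v c)) ∧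
    wfV n m (bfs g start.1 start.2 n m v).2 := by
  obtain ⟨hb1, hb2, hb3, hb4, hx⟩ := hland
  have hiff := mA_vSet_iff hwf hb1 hb2 hb3 hb4
  have hstart1 : mA n m (vSet v start.1 start.2) start := (hiff start).mpr (Or.inr (by simp))
  have hInv : InvA g n m v start (vSet v start.1 start.2) [start] (pvVal (pvCell g start.1 start.2)) :=
    { wf := wfV_vSet hwf _ _
      mono := fun c hc => (hiff c).mpr (Or.inl hc)
      nodupq := List.nodup_singleton start
      qnew := by
        intro c hc
        rw [List.mem_singleton] at hc
        subst hc
        exact ⟨⟨hstart1, hns⟩, ⟨hb1, hb2, hb3, hb4, hx⟩⟩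
      reach := by
        intro c h1 h2
        rcases (hiff c).mp h1 with h | h
        · exact absurd h h2
        · rw [show c = start from h]
          exact Relation.ReflTransGen.refl
      closed := by
        intro c h1 h2 hcq d hadj
        exfalso
        rcases (hiff c).mp h1 with h | h
        · exact h2 h
        · exact hcq (by rw [List.mem_singleton]; exact h)
      startm := ⟨hstart1, hns⟩
      area_eq := by
        have hmv : mAb n m v start = false := by
          cases h : mAb n m v start
          · rfl
          · exact absurd ((mAb_iff n m v start).mp h) hns
        have hq1 : (mAb n m (vSet v start.1 start.2) start && !mAb n m v start) = true := by
          simp [(mAb_iff _ _ _ _).mpr hstart1, hmv]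
        have hrest : ∀ c : Int × Int, c ≠ start →
            (mAb n m (vSet v start.1 start.2) c && !mAb n m v c) = false := by
          intro c hc
          cases h1 : mAb n m (vSet v start.1 start.2) c
          · simp
          · rcases (hiff c).mp ((mAb_iff _ _ _ _).mp h1) with h | h
            · simp [(mAb_iff _ _ _ _).mpr h]
            · exact absurd h hc
        rw [csum_filter_insert (nodup_gridL n m)
          ((mem_gridL n m start).mpr ⟨hb1, hb2, hb3, hb4⟩)
          (p := fun _ => false)
          (q := fun c => mAb n m (vSet v start.1 start.2) c && !mAb n m v c)
          rfl hq1 (fun c hc => hrest c hc)]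
        simp [List.filter_false, csum_nil] }
  have hloop := bfsLoop_spec (start := start) hold (vSet v start.1 start.2) [start]
    (pvVal (pvCell g start.1 start.2)) hInv
  exact hloop

-- ===== B-side: the saturation loop computes exactly the reach set of its seed =====

-- invariant of the saturation: seed inside, everything land and reachable, no duplicates
def InvC (g : List (List Char)) (n m : Int) (start : Int × Int)
    (comp : PySem.Set (Int × Int)) : Prop :=
  start ∈ comp ∧ comp.Nodup ∧ ∀ c ∈ comp, landP g n m c ∧ Reach g n m start c

theorem invC_union_grow {g : List (List Char)} {n m : Int} {start : Int × Int}
    {comp : PySem.Set (Int × Int)} (hI : InvC g n m start comp) :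
    InvC g n m start (PySem.Set.union comp (PySem.Set.ofList (growList g n m comp))) := by
  obtain ⟨hs, hnd, hmem⟩ := hI
  refine ⟨(PySem.Set.mem_union _ _ _).mpr (Or.inl hs), PySem.Set.nodup_union _ _ hnd, ?_⟩
  intro c hc
  rcases (PySem.Set.mem_union _ _ _).mp hc with hc | hc
  · exact hmem c hc
  · have hcg := (PySem.Set.mem_ofList _ _).mp hc
    obtain ⟨⟨b, hb, d, hd, rfl⟩, h1, h2, h3, h4, h5, -⟩ := mem_growList hcg
    obtain ⟨hbl, hbr⟩ := hmem b hb
    have hadj : adjP g n m b (b.1 + d.1, b.2 + d.2) := by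
      refine ⟨hbl, ⟨h1, h2, h3, h4, h5⟩, ?_⟩
      fin_cases hd <;> simp <;> omega
    exact ⟨⟨h1, h2, h3, h4, h5⟩, Relation.ReflTransGen.tail hbr hadj⟩

theorem satLoop_spec {g : List (List Char)} {n m : Int} {start : Int × Int} :
    ∀ (comp : PySem.Set (Int × Int)), InvC g n m start comp →
    (∀ c, c ∈ satLoop g n m comp ↔ Reach g n m start c) ∧ (satLoop g n m comp).Nodup := by
  intro comp
  induction comp using satLoop.induct g n m with
  | case1 comp hempty =>
    intro hI
    obtain ⟨hs, hnd, hmem⟩ := hI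
    rw [satLoop]
    rw [if_pos hempty]
    refine ⟨?_, hnd⟩
    -- the fixpoint is adjacency-closed: a missing neighbour would be in grown
    have hclosed : ∀ c ∈ comp, ∀ d, adjP g n m c d → d ∈ comp := by
      intro c hc d hadj
      by_contra hdn
      have hdg : d ∈ growList g n m comp := by
        simp only [growList, List.mem_flatMap, List.mem_filter, List.mem_map]
        refine ⟨c, hc, ⟨?_, ?_⟩⟩
        · rcases adj_offsets hadj with h | h | h | h
          · exact ⟨(-1, 0), by simp [pvOffs], h.symm⟩
          · exact ⟨(0, -1), by simp [pvOffs], h.symm⟩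
          · exact ⟨(1, 0), by simp [pvOffs], h.symm⟩
          · exact ⟨(0, 1), by simp [pvOffs], h.symm⟩
        · obtain ⟨l1, l2, l3, l4, l5⟩ := hadj.2.1
          simp only [Bool.and_eq_true, decide_eq_true_eq, Bool.not_eq_true']
          refine ⟨⟨⟨⟨⟨l1, l2⟩, l3⟩, l4⟩, l5⟩, ?_⟩
          cases hcd : PySem.Set.contains comp d
          · rfl
          · exact absurd ((PySem.Set.contains_iff _ _).mp hcd) hdn
      have : d ∈ (PySem.Set.ofList (growList g n m comp)) := (PySem.Set.mem_ofList _ _).mpr hdg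
      rw [hempty] at this
      exact List.not_mem_nil this
    intro c
    constructor
    · intro hc; exact (hmem c hc).2
    · intro h
      induction h with
      | refl => exact hs
      | tail hr hadj ih => exact hclosed _ ih _ hadj
  | case2 comp hne ih =>
    intro hI
    rw [satLoop]
    rw [if_neg hne]
    exact ih (invC_union_grow hI)

-- relation between the two outer scans
def OInv (g : List (List Char)) (n m : Int)
    (a : List (List Bool) × List Int) (b : PySem.Set (Int × Int) × List Int) : Prop :=
  wfV n m a.1 ∧ (∀ c, mA n m a.1 c ↔ mB n m b.1 c) ∧
  (∀ c d, adjP g n m c d → mA n m a.1 d → mA n m a.1 c) ∧ a.2 = b.2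

theorem foldl_rel {α β γ : Type} (R : α → β → Prop) (f : α → γ → α) (g : β → γ → β) :
    ∀ (l : List γ), (∀ x ∈ l, ∀ a b, R a b → R (f a x) (g b x)) →
    ∀ a b, R a b → R (l.foldl f a) (l.foldl g b) := by
  intro l
  induction l with
  | nil => intro _ a b h; exact h
  | cons x t ih =>
    intro hstep a b h
    exact ih (fun y hy => hstep y (List.mem_cons_of_mem x hy)) _ _
      (hstep x List.mem_cons_self a b h)

theorem cell_step {g : List (List Char)} {n m : Int} {i j : Int}
    (hi : 0 ≤ i ∧ i < n) (hj : 0 ≤ j ∧ j < m)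
    {a : List (List Bool) × List Int} {b : PySem.Set (Int × Int) × List Int}
    (hR : OInv g n m a b) :
    OInv g n m
      (if vGet a.1 i j = false ∧ pvCell g i j ≠ 'X' then
        ((bfs g i j n m a.1).2, a.2 ++ [(bfs g i j n m a.1).1]) else a)
      (if pvCell g i j ≠ 'X' ∧ PySem.Set.contains b.1 (i, j) = false then
        (PySem.Set.union b.1 (satLoop g n m (PySem.Set.ofList [(i, j)])),
         b.2 ++ [csum g (satLoop g n m (PySem.Set.ofList [(i, j)]))]) else b) := by
  obtain ⟨hwf, hiffab, hcl, hres⟩ := hR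
  have hmab := hiffab (i, j)
  by_cases hg : vGet a.1 i j = false ∧ pvCell g i j ≠ 'X'
  · rw [if_pos hg]
    have hnsA : ¬ mA n m a.1 (i, j) := fun hc => by
      have := hc.2.2.2.2
      rw [hg.1] at this
      exact Bool.false_ne_true this
    have hnsB : ¬ mB n m b.1 (i, j) := fun hc => hnsA (hmab.mpr hc)
    have hcontB : PySem.Set.contains b.1 (i, j) = false := by
      cases hcc : PySem.Set.contains b.1 (i, j)
      · rfl
      · exact absurd ⟨hi.1, hi.2, hj.1, hj.2, (PySem.Set.contains_iff _ _).mp hcc⟩ hnsB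
    rw [if_pos ⟨hg.2, hcontB⟩]
    have hland : landP g n m (i, j) := ⟨hi.1, hi.2, hj.1, hj.2, hg.2⟩
    set comp := satLoop g n m (PySem.Set.ofList [(i, j)]) with hcomp
    have hI0 : InvC g n m (i, j) (PySem.Set.ofList [(i, j)]) := by
      refine ⟨(PySem.Set.mem_ofList _ _).mpr (by simp), PySem.Set.nodup_ofList _, ?_⟩
      intro c hc
      rw [PySem.Set.mem_ofList, List.mem_singleton] at hc
      subst hc
      exact ⟨hland, Relation.ReflTransGen.refl⟩
    obtain ⟨hcmem, hcnd⟩ := satLoop_spec (PySem.Set.ofList [(i, j)]) hI0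
    obtain ⟨hiffA, hareaA, hwfA⟩ := bfs_spec (start := (i, j)) hwf hcl hland hnsA
    -- a previously marked cell is never reachable from this fresh start
    have hreach_new : ∀ c, Reach g n m (i, j) c → ¬ mA n m a.1 c := by
      intro c hrc hmc
      exact hnsA (reach_marked (mA n m a.1) hcl hrc hmc)
    have hiff' : ∀ c, mA n m (bfs g i j n m a.1).2 c ↔
        mB n m (PySem.Set.union b.1 comp) c := by
      intro c
      rw [hiffA c]
      unfold mB
      constructor
      · rintro (h | h)
        · obtain ⟨k1, k2, k3, k4, k5⟩ := (hiffab c).mp h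
          exact ⟨k1, k2, k3, k4, (PySem.Set.mem_union _ _ _).mpr (Or.inl k5)⟩
        · obtain ⟨k1, k2, k3, k4, -⟩ := reach_land hland h
          exact ⟨k1, k2, k3, k4, (PySem.Set.mem_union _ _ _).mpr (Or.inr ((hcmem c).mpr h))⟩
      · rintro ⟨k1, k2, k3, k4, k5⟩
        rcases (PySem.Set.mem_union _ _ _).mp k5 with h | h
        · exact Or.inl ((hiffab c).mpr ⟨k1, k2, k3, k4, h⟩)
        · exact Or.inr ((hcmem c).mp h)
    refine ⟨hwfA, hiff', ?_, ?_⟩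
    · -- closedness of the enlarged marked set
      intro c d hadj hd
      rcases (hiffA d).mp hd with h | h
      · exact (hiffA c).mpr (Or.inl (hcl c d hadj h))
      · exact (hiffA c).mpr (Or.inr (Relation.ReflTransGen.tail h (adjP_symm hadj)))
    · -- equal appended results: A's area is the csum over the reach class, which is comp
      have hfilt : ((gridL n m).filter
          (fun c => mAb n m (bfs g i j n m a.1).2 c && !mAb n m a.1 c)).Perm comp := by
        rw [List.perm_ext_iff_of_nodup ((nodup_gridL n m).filter _) hcnd]
        intro c
        rw [List.mem_filter, hcmem c]
        constructor
        · rintro ⟨-, hcond⟩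
          simp only [Bool.and_eq_true, Bool.not_eq_true'] at hcond
          obtain ⟨h1, h2⟩ := hcond
          rcases (hiffA c).mp ((mAb_iff _ _ _ _).mp h1) with h | h
          · exact absurd ((mAb_iff _ _ _ _).mpr h) (by rw [h2]; exact Bool.false_ne_true)
          · exact h
        · intro hrc
          have hlc := reach_land hland hrc
          have hnot : mAb n m a.1 c = false := by
            cases h : mAb n m a.1 c
            · rfl
            · exact absurd ((mAb_iff _ _ _ _).mp h) (hreach_new c hrc)
          refine ⟨(mem_gridL n m c).mpr ⟨hlc.1, hlc.2.1, hlc.2.2.1, hlc.2.2.2.1⟩, ?_⟩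
          simp only [Bool.and_eq_true, Bool.not_eq_true']
          exact ⟨(mAb_iff _ _ _ _).mpr ((hiffA c).mpr (Or.inr hrc)), hnot⟩
      rw [hres, hareaA, csum_perm hfilt]
  · rw [if_neg hg]
    have hgB : ¬ (pvCell g i j ≠ 'X' ∧ PySem.Set.contains b.1 (i, j) = false) := by
      intro ⟨hx, hcont⟩
      apply hg
      refine ⟨?_, hx⟩
      cases hv : vGet a.1 i j
      · rfl
      · exfalso
        have hmA : mA n m a.1 (i, j) := ⟨hi.1, hi.2, hj.1, hj.2, hv⟩
        have := (PySem.Set.contains_iff b.1 (i, j)).mpr (hmab.mp hmA).2.2.2.2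
        rw [hcont] at this
        exact Bool.false_ne_true this
    rw [if_neg hgB]
    exact ⟨hwf, hiffab, hcl, hres⟩

theorem outer_spec (g : List (List Char)) (n m : Int) :
    OInv g n m
      ((PySem.List.pyRange 0 n 1).foldl (fun st i =>
        (PySem.List.pyRange 0 m 1).foldl (fun st j =>
          if vGet st.1 i j = false ∧ pvCell g i j ≠ 'X' then
            ((bfs g i j n m st.1).2, st.2 ++ [(bfs g i j n m st.1).1])
          else st) st)
        (List.replicate n.toNat (List.replicate m.toNat false), ([] : List Int)))
      ((PySem.List.pyRange 0 n 1).foldl (fun st i =>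
        (PySem.List.pyRange 0 m 1).foldl (fun st j =>
          if pvCell g i j ≠ 'X' ∧ PySem.Set.contains st.1 (i, j) = false then
            (PySem.Set.union st.1 (satLoop g n m (PySem.Set.ofList [(i, j)])),
             st.2 ++ [csum g (satLoop g n m (PySem.Set.ofList [(i, j)]))])
          else st) st)
        ((PySem.Set.empty : PySem.Set (Int × Int)), ([] : List Int))) := by
  apply foldl_rel
  · intro i hi a b hR
    apply foldl_rel
    · intro j hj a' b' hR'
      have hi' := PySem.List.mem_pyRange_one.mp hi
      have hj' := PySem.List.mem_pyRange_one.mp hj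
      exact cell_step ⟨hi'.1, hi'.2⟩ ⟨hj'.1, hj'.2⟩ hR'
    · exact hR
  · refine ⟨wfV_init n m, ?_, ?_, rfl⟩
    · intro c
      constructor
      · intro h; exact absurd h (mA_init n m c)
      · intro h; exact absurd h.2.2.2.2 (List.not_mem_nil)
    · intro c d _ hd
      exact absurd hd (mA_init n m d)

-- ===== VERDICT (by name: the statement is the Claim_ definition above) =====
theorem solution_spec : Claim_equal_solution := by
  intro maps _ _
  show solution maps = solution_alt maps
  simp only [solution, solution_alt]
  obtain ⟨-, -, -, hres⟩ := outer_spec (maps.map (·.toList)) (maps.length : Int)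
      (((PySem.List.pyGetD (maps.map (·.toList)) 0 []).length : Int))
  rw [hres]
  by_cases hE : ((PySem.List.pyRange 0 (maps.length : Int) 1).foldl (fun st i =>
        (PySem.List.pyRange 0 (((PySem.List.pyGetD (maps.map (·.toList)) 0 []).length : Int)) 1).foldl (fun st j =>
          if pvCell (maps.map (·.toList)) i j ≠ 'X' ∧ PySem.Set.contains st.1 (i, j) = false then
            (PySem.Set.union st.1 (satLoop (maps.map (·.toList)) (maps.length : Int) (((PySem.List.pyGetD (maps.map (·.toList)) 0 []).length : Int)) (PySem.Set.ofList [(i, j)])),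
             st.2 ++ [csum (maps.map (·.toList)) (satLoop (maps.map (·.toList)) (maps.length : Int) (((PySem.List.pyGetD (maps.map (·.toList)) 0 []).length : Int)) (PySem.Set.ofList [(i, j)]))])
          else st) st)
        ((PySem.Set.empty : PySem.Set (Int × Int)), ([] : List Int))).2 = []
  · rw [hE]
    simp
  · rw [if_pos (List.length_pos_iff.mpr hE), if_pos hE]
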